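-- pv_equiv track=rewrite | github.com/Rei02061986/patent-space-mcp | sources/epo_ops.py | _normalize_docdb_ref
-- ===== SOURCE A (Python) =====
-- def _normalize_docdb_ref(publication_number: str) -> str:
--     """Convert various publication number formats to the EPO docdb
--     dot-separated format.
--
--     Accepts:
--         "EP-1000000-A1"  -> "EP.1000000.A1"
--         "EP.1000000.A1"  -> "EP.1000000.A1" (unchanged)
--         "EP1000000A1"    -> best-effort split (unreliable for ambiguous formats)
--
--     Returns:
--         Dot-separated docdb reference string.
--     """
--     # Already in dot format.
--     if "." in publication_number:
--         return publication_number
--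
--     # Hyphen format is the project's canonical format.
--     if "-" in publication_number:
--         return publication_number.replace("-", ".")
--
--     # Best-effort: assume 2-letter country prefix and optional kind suffix.
--     # This is a heuristic and may fail for edge cases.
--     s = publication_number.strip()
--     if len(s) >= 3 and s[:2].isalpha():
--         country = s[:2]
--         rest = s[2:]
--         # Find where digits end and kind code begins.
--         num_end = 0
--         for i, ch in enumerate(rest):
--             if ch.isdigit():
--                 num_end = i + 1
--             else:
--                 if num_end > 0:
--                     break
--         if num_end > 0:
--             number = rest[:num_end]
--             kind = rest[num_end:]
--             parts = [country, number]
--             if kind: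
--                 parts.append(kind)
--             return ".".join(parts)
--
--     # Fallback: return as-is and let the API return an error.
--     return publication_number
-- ===== SOURCE B (Python) =====
-- def _normalize_docdb_ref(publication_number: str) -> str:
--     """Convert a publication number to the EPO docdb dot-separated format."""
--     # Already in dot format.
--     if "." in publication_number:
--         return publication_number
--     # Hyphen format is the project's canonical format.
--     if "-" in publication_number:
--         return publication_number.replace("-", ".")
--     # Best-effort: 2-letter country prefix, a run of digits, optional kind suffix.
--     s = publication_number.strip()
--     if len(s) >= 3 and s[:2].isalpha():
--         rest = s[2:]
--         kind = rest.lstrip("0123456789")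
--         number = rest[:len(rest) - len(kind)]
--         if number:
--             return ".".join(filter(None, (s[:2], number, kind)))
--     # Fallback: return as-is and let the API return an error.
--     return publication_number
-- ===== Notes on version B (the rewrite author's own statement) =====
-- stated objective: idiomatic
-- what changed: The manual enumerate loop tracking num_end with a conditional break is replaced by an lstrip-based split of the tail into its leading digit run and the remainder, joined with filter(None, ...).
-- intended difference: On inputs without dot or hyphen whose stripped form has a 2-letter prefix followed by a non-digit before the first digit (e.g. 'EPA123'), A folds those non-digits into the number and returns a dotted join whose number part is not numeric; B returns the input unchanged so the API can report the error, which is the intended fallback. — e.g. on _normalize_docdb_ref("EPA123"): A returns "EP.A123", B returns "EPA123"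
import Mathlib
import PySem

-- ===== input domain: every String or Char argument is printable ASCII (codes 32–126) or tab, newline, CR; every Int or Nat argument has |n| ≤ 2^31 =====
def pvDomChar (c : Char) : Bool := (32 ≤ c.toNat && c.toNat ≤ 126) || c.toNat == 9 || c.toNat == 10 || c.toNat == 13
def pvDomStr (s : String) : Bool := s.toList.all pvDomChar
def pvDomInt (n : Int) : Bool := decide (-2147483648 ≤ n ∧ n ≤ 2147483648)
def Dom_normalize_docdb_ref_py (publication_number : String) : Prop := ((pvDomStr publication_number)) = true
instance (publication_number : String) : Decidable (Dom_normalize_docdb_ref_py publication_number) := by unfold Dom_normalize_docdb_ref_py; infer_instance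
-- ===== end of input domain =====

-- B replaces A's manual index-tracking digit-scan loop by an lstrip-based split of the tail
-- into leading digit run and remainder (objective: idiomatic); where the tail has non-digits
-- before its first digit, A folds them into the number while B falls through unchanged (D_).

-- ===== PORT A =====
-- the 'for i, ch in enumerate(rest): …' loop with its num_end state and break, transliterated
def pvALoop (l : List Char) (i num_end : Nat) : Nat :=
  match l with
  | [] => num_end
  | c :: t =>
    if PySem.Chars.isdigit c then pvALoop t (i + 1) (i + 1)
    else if num_end > 0 then num_end else pvALoop t (i + 1) num_end

def normalize_docdb_ref_py (publication_number : String) : String :=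
  if PySem.Str.isIn "." publication_number then publication_number
  else if PySem.Str.isIn "-" publication_number then
    PySem.Str.replace publication_number "-" "."
  else
    let s := PySem.Chars.strip publication_number.toList
    if 3 ≤ s.length && PySem.Chars.strIsalpha (PySem.Chars.slice s none (some 2)) then
      let country := PySem.Chars.slice s none (some 2)
      let rest := PySem.Chars.slice s (some 2) none
      let num_end := pvALoop rest 0 0
      if num_end > 0 then
        let number := PySem.Chars.slice rest none (some (num_end : Int))
        let kind := PySem.Chars.slice rest (some (num_end : Int)) none
        let parts := [country, number]
        let parts := if kind ≠ [] then parts ++ [kind] else parts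
        String.ofList (PySem.Chars.join ['.'] parts)
      else publication_number
    else publication_number

-- ===== PORT B =====
-- Source B's rest.lstrip("0123456789"): Python lstrip with a char set, ported by hand as
-- dropWhile over exactly that set (= PySem.Chars.isdigit, the ASCII digits); exact.
def pvLstripDigits (l : List Char) : List Char := l.dropWhile PySem.Chars.isdigit

def normalize_docdb_ref_py_alt (publication_number : String) : String :=
  if PySem.Str.isIn "." publication_number then publication_number
  else if PySem.Str.isIn "-" publication_number then
    PySem.Str.replace publication_number "-" "."
  else
    let s := PySem.Chars.strip publication_number.toList
    if 3 ≤ s.length && PySem.Chars.strIsalpha (PySem.Chars.slice s none (some 2)) then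
      let rest := PySem.Chars.slice s (some 2) none
      let kind := pvLstripDigits rest
      let number := PySem.Chars.slice rest none (some ((rest.length - kind.length : Nat) : Int))
      if number ≠ [] then
        String.ofList (PySem.Chars.join ['.']
          (([PySem.Chars.slice s none (some 2), number, kind]).filter (· ≠ [])))
      else publication_number
    else publication_number

-- ===== PRECONDITION & SPEC =====
-- On inputs without dot/hyphen whose stripped form has a 2-letter prefix followed by a
-- non-digit before the first digit (e.g. "EPA123"), A folds those non-digits into the
-- number and returns a dotted join whose number part is not numeric; B returns the input
-- unchanged so the API can report the error, which is the intended fallback.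
def D_normalize_docdb_ref_py (publication_number : String) : Prop :=
  PySem.Str.isIn "." publication_number = false ∧
  PySem.Str.isIn "-" publication_number = false ∧
  3 ≤ (PySem.Chars.strip publication_number.toList).length ∧
  PySem.Chars.strIsalpha ((PySem.Chars.strip publication_number.toList).take 2) = true ∧
  ((PySem.Chars.strip publication_number.toList).drop 2).any PySem.Chars.isdigit = true ∧
  ((PySem.Chars.strip publication_number.toList).drop 2).head?.all
    (fun c => !PySem.Chars.isdigit c) = true
instance (publication_number : String) : Decidable (D_normalize_docdb_ref_py publication_number) := by unfold D_normalize_docdb_ref_py; infer_instance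

def Spec_normalize_docdb_ref_py (publication_number : String) (out : String) : Prop := ¬ D_normalize_docdb_ref_py publication_number → out = normalize_docdb_ref_py_alt publication_number
instance (publication_number : String) (out : String) : Decidable (Spec_normalize_docdb_ref_py publication_number out) := by unfold Spec_normalize_docdb_ref_py; infer_instance

def pvDiffWitness_normalize_docdb_ref_py : String := "EPA123"
def pvDiffWitnessOut_normalize_docdb_ref_py : String × String := ("EP.A123", "EPA123")

-- ===== CLAIM (what is proved, stated in full; the proofs are below) =====
def Claim_unchanged_normalize_docdb_ref_py : Prop := ∀ (publication_number : String), Dom_normalize_docdb_ref_py publication_number → Spec_normalize_docdb_ref_py publication_number (normalize_docdb_ref_py publication_number)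
def Claim_changed_normalize_docdb_ref_py : Prop := Dom_normalize_docdb_ref_py (pvDiffWitness_normalize_docdb_ref_py) ∧ D_normalize_docdb_ref_py (pvDiffWitness_normalize_docdb_ref_py) ∧ normalize_docdb_ref_py (pvDiffWitness_normalize_docdb_ref_py) = pvDiffWitnessOut_normalize_docdb_ref_py.1 ∧ normalize_docdb_ref_py_alt (pvDiffWitness_normalize_docdb_ref_py) = pvDiffWitnessOut_normalize_docdb_ref_py.2 ∧ pvDiffWitnessOut_normalize_docdb_ref_py.1 ≠ pvDiffWitnessOut_normalize_docdb_ref_py.2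
def Claim_exact_normalize_docdb_ref_py : Prop := ∀ (publication_number : String), Dom_normalize_docdb_ref_py publication_number → D_normalize_docdb_ref_py publication_number → normalize_docdb_ref_py publication_number ≠ normalize_docdb_ref_py_alt publication_number

-- ===== LEMMAS AND PROOFS =====

-- phase 2 of A's loop: once a digit was seen (num_end = i > 0), it consumes the digit run
lemma pvALoop_phase2 (l : List Char) (i : Nat) (hi : 0 < i) :
    pvALoop l i i = i + (l.takeWhile PySem.Chars.isdigit).length := by
  induction l generalizing i with
  | nil => simp [pvALoop]
  | cons c t ih =>
    by_cases hc : PySem.Chars.isdigit c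
    · simp [pvALoop, hc, ih (i + 1) (by omega)]
      omega
    · simp [pvALoop, hc, hi]

-- A's loop from the initial state computes the span lengths of the nondigit/digit split
lemma pvALoop_eq (l : List Char) (i : Nat) :
    pvALoop l i 0 =
      if l.any PySem.Chars.isdigit then
        i + (l.takeWhile (fun c => !PySem.Chars.isdigit c)).length
          + ((l.dropWhile (fun c => !PySem.Chars.isdigit c)).takeWhile PySem.Chars.isdigit).length
      else 0 := by
  induction l generalizing i with
  | nil => simp [pvALoop]
  | cons c t ih =>
    by_cases hc : PySem.Chars.isdigit c
    · simp [pvALoop, hc, pvALoop_phase2 t (i + 1) (by omega)]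
      omega
    · simp only [pvALoop, hc, if_false, gt_iff_lt, Nat.lt_irrefl, ih (i + 1),
        List.any_cons, List.takeWhile_cons, List.dropWhile_cons,
        Bool.not_false, if_true]
      by_cases ht : t.any PySem.Chars.isdigit
      · simp [ht]
        omega
      · simp [ht]

lemma pvSpan_digit (l : List Char) (hd : l.any PySem.Chars.isdigit = true) :
    (l.dropWhile (fun c => !PySem.Chars.isdigit c)).takeWhile PySem.Chars.isdigit ≠ [] := by
  induction l with
  | nil => simp at hd
  | cons c t ih =>
    by_cases hc : PySem.Chars.isdigit c = true
    · simp [hc]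
    · simp only [List.dropWhile_cons, hc, Bool.not_false, if_true]
      apply ih
      simpa [hc] using hd

-- '.' occurs in the joined output whenever there are at least two parts
lemma pvDot_mem_join (x y : List Char) (r : List (List Char)) :
    '.' ∈ PySem.Chars.join ['.'] (x :: y :: r) := by
  rw [PySem.Chars.join_cons_cons]
  simp

-- ['.'] is an infix iff '.' is a member
lemma pvSingleton_infix (l : List Char) : (['.'] <:+: l) ↔ '.' ∈ l := by
  constructor
  · rintro ⟨p, q, rfl⟩; simp
  · intro h
    obtain ⟨p, q, rfl⟩ := List.append_of_mem h
    exact ⟨p, q, by simp⟩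

-- main agreement lemma, outside D_
lemma pv_agree (pn : String) (hnd : ¬ D_normalize_docdb_ref_py pn) :
    normalize_docdb_ref_py pn = normalize_docdb_ref_py_alt pn := by
  unfold normalize_docdb_ref_py normalize_docdb_ref_py_alt
  by_cases h1 : PySem.Str.isIn "." pn = true
  · rw [if_pos h1, if_pos h1]
  · rw [if_neg h1, if_neg h1]
    by_cases h2 : PySem.Str.isIn "-" pn = true
    · rw [if_pos h2, if_pos h2]
    · rw [if_neg h2, if_neg h2]
      dsimp only
      set S := PySem.Chars.strip pn.toList with hS
      by_cases h3 : (3 ≤ S.length && PySem.Chars.strIsalpha (PySem.Chars.slice S none (some 2)))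
          = true
      · rw [if_pos h3, if_pos h3]
        have hcty : PySem.Chars.slice S none (some 2) = S.take 2 := by simp [pysem]
        have hrst : PySem.Chars.slice S (some 2) none = S.drop 2 := by simp [pysem]
        rw [hcty, hrst]
        set rest := S.drop 2 with hrest
        rw [pvALoop_eq]
        by_cases hd : rest.any PySem.Chars.isdigit = true
        · -- there is a digit; since ¬ D_, rest starts with a digit
          have hh3 := h3
          rw [Bool.and_eq_true] at hh3
          have hhead : ∃ c, rest.head? = some c ∧ PySem.Chars.isdigit c = true := by
            by_contra hcon
            apply hnd
            refine ⟨by simpa using h1, by simpa using h2, by simpa using hh3.1,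
              by rw [← hcty]; exact hh3.2, hd, ?_⟩
            show rest.head?.all (fun c => !PySem.Chars.isdigit c) = true
            cases hh : rest.head? with
            | none => simp
            | some c =>
              simp only [Option.all_some]
              by_contra hcd
              simp only [Bool.not_eq_true, Bool.not_eq_false'] at hcd
              exact hcon ⟨c, hh, hcd⟩
          obtain ⟨c, hc, hcd⟩ := hhead
          obtain ⟨t, hct⟩ : ∃ t, rest = c :: t := by
            cases hr : rest with
            | nil => rw [hr] at hc; simp at hc
            | cons a t =>
              rw [hr] at hc
              simp only [List.head?_cons, Option.some.injEq] at hc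
              exact ⟨t, by rw [hc]⟩
          simp only [hd, if_true]
          have htw : rest.takeWhile (fun c => !PySem.Chars.isdigit c) = [] := by
            simp [hct, hcd]
          have hdw : rest.dropWhile (fun c => !PySem.Chars.isdigit c) = rest := by
            simp [hct, hcd]
          rw [htw, hdw]
          set d := rest.takeWhile PySem.Chars.isdigit with hdd
          set k := rest.dropWhile PySem.Chars.isdigit with hk
          have hdne : d ≠ [] := by simp [hdd, hct, hcd]
          have hsplit : rest = d ++ k := by
            rw [hdd, hk, List.takeWhile_append_dropWhile]
          simp only [List.length_nil, Nat.add_zero, Nat.zero_add]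
          have hpos : d.length > 0 := List.length_pos_iff.mpr hdne
          rw [if_pos hpos]
          have hpv : pvLstripDigits rest = k := by rw [hk]; rfl
          have hlen : rest.length - k.length = d.length := by
            rw [hsplit]; simp
          have hnumA : PySem.Chars.slice rest none (some ((d.length : Nat) : Int)) = d := by
            rw [PySem.Chars.slice_eq_listSlice,
              PySem.List.slice_to rest (Int.natCast_nonneg _)]
            simp only [Int.toNat_natCast]
            conv_lhs => rw [hsplit]
            simp
          have hkndA : PySem.Chars.slice rest (some ((d.length : Nat) : Int)) none = k := by
            rw [PySem.Chars.slice_eq_listSlice,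
              PySem.List.slice_from rest (Int.natCast_nonneg _)]
            simp only [Int.toNat_natCast]
            conv_lhs => rw [hsplit]
            simp
          rw [hpv, hlen, hnumA, hkndA]
          have hctyne : S.take 2 ≠ [] := by
            have hl3 : 3 ≤ S.length := by simpa using hh3.1
            intro he
            have := congrArg List.length he
            simp [Nat.min_eq_left (by omega : 2 ≤ S.length)] at this
          by_cases hke : k = []
          · simp [hke, List.filter, hctyne, hdne]
          · simp [hke, List.filter, hctyne, hdne]
        · -- no digit: both fall through to the input
          simp only [hd, if_false, Bool.false_eq_true]
          rw [if_neg (by omega : ¬ (0 : Nat) > 0)]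
          have hall := List.any_eq_false.mp (by simpa using hd)
          have hkk : pvLstripDigits rest = rest := by
            unfold pvLstripDigits
            rw [List.dropWhile_eq_self_iff]
            intro hl
            exact by simpa using hall _ (List.getElem_mem hl)
          have hnum0 : PySem.Chars.slice rest none
              (some ((rest.length - rest.length : Nat) : Int)) = [] := by
            rw [PySem.Chars.slice_eq_listSlice,
              PySem.List.slice_to rest (Int.natCast_nonneg _)]
            simp
          rw [hkk, hnum0]
          simp
      · rw [if_neg h3, if_neg h3]

-- inside D_: B returns the input unchanged while A returns a dotted join
lemma pv_tight (pn : String) (hD : D_normalize_docdb_ref_py pn) :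
    normalize_docdb_ref_py pn ≠ normalize_docdb_ref_py_alt pn := by
  obtain ⟨h1, h2, h3, h4, h5, h6⟩ := hD
  have h1' : ¬ PySem.Str.isIn "." pn = true := by rw [h1]; simp
  have h2' : ¬ PySem.Str.isIn "-" pn = true := by rw [h2]; simp
  have hcty : PySem.Chars.slice (PySem.Chars.strip pn.toList) none (some 2)
      = (PySem.Chars.strip pn.toList).take 2 := by simp [pysem]
  have hrst : PySem.Chars.slice (PySem.Chars.strip pn.toList) (some 2) none
      = (PySem.Chars.strip pn.toList).drop 2 := by simp [pysem]
  have hg : (3 ≤ (PySem.Chars.strip pn.toList).length &&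
      PySem.Chars.strIsalpha (PySem.Chars.slice (PySem.Chars.strip pn.toList) none (some 2)))
      = true := by
    rw [hcty]
    simp [h3, h4]
  set rest := (PySem.Chars.strip pn.toList).drop 2 with hrest
  -- B returns pn: rest does not start with a digit, so the digit prefix is empty
  have hkk : pvLstripDigits rest = rest := by
    unfold pvLstripDigits
    cases hr : rest with
    | nil => simp
    | cons a t =>
      have h6' := h6
      rw [hr] at h6'
      simp only [List.head?_cons, Option.all_some] at h6'
      have ha : PySem.Chars.isdigit a = false := by simpa using h6'
      simp [ha]
  have hB : normalize_docdb_ref_py_alt pn = pn := by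
    unfold normalize_docdb_ref_py_alt
    rw [if_neg h1', if_neg h2']
    dsimp only
    rw [if_pos hg, hrst, hkk]
    have hnum0 : PySem.Chars.slice rest none
        (some ((rest.length - rest.length : Nat) : Int)) = [] := by
      rw [PySem.Chars.slice_eq_listSlice,
        PySem.List.slice_to rest (Int.natCast_nonneg _)]
      simp
    rw [hnum0]
    simp
  -- A returns a string containing '.', but pn contains no '.'
  have hdotpn : '.' ∉ pn.toList := by
    intro hm
    have hin : PySem.Str.isIn "." pn = true := by
      rw [PySem.Str.isIn_iff_infix]
      simpa using (pvSingleton_infix pn.toList).mpr hm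
    exact h1' hin
  rw [hB]
  unfold normalize_docdb_ref_py
  rw [if_neg h1', if_neg h2']
  dsimp only
  rw [if_pos hg, hrst, pvALoop_eq]
  simp only [h5, if_true]
  have hpos : 0 + (rest.takeWhile (fun c => !PySem.Chars.isdigit c)).length
      + ((rest.dropWhile (fun c => !PySem.Chars.isdigit c)).takeWhile
          PySem.Chars.isdigit).length > 0 := by
    have := List.length_pos_iff.mpr (pvSpan_digit rest h5)
    omega
  rw [if_pos hpos]
  intro heq
  have hlist := congrArg String.toList heq
  simp only [String.toList_ofList] at hlist
  have hmem : '.' ∈ pn.toList := by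
    rw [← hlist]
    by_cases hke : PySem.Chars.slice rest
        (some ((0 + (rest.takeWhile (fun c => !PySem.Chars.isdigit c)).length
          + ((rest.dropWhile (fun c => !PySem.Chars.isdigit c)).takeWhile
              PySem.Chars.isdigit).length : Nat) : Int)) none ≠ []
    · rw [if_pos hke]
      exact pvDot_mem_join _ _ _
    · rw [if_neg hke]
      exact pvDot_mem_join _ _ _
  exact hdotpn hmem

-- ===== VERDICT (by name: the statement is the Claim_ definition above) =====
theorem normalize_docdb_ref_py_spec : Claim_unchanged_normalize_docdb_ref_py := by
  intro pn _
  unfold Spec_normalize_docdb_ref_py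
  intro hnd
  exact pv_agree pn hnd

set_option maxRecDepth 8192 in
theorem normalize_docdb_ref_py_changed : Claim_changed_normalize_docdb_ref_py := by
  unfold Claim_changed_normalize_docdb_ref_py
  refine ⟨by decide, by decide, by decide, by decide, by decide⟩

theorem normalize_docdb_ref_py_tight : Claim_exact_normalize_docdb_ref_py := by
  intro pn _ hD
  exact pv_tight pn hD
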